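-- pv_equiv track=rewrite | github.com/youtube/cobalt | components/safe_browsing/content/resources/real_time_url_checks_allowlist/validation_utils.py | _HasNoHashDuplicates
-- ===== SOURCE A (Python) =====
-- HASH_PREFIX_SIZE = 16
--
-- def _HasNoHashDuplicates(hashes):
--     """ Returns true if there are no duplicate hash prefixes """
--     url_hash_prefix_set = set()
--     for i in range(0, len(hashes), HASH_PREFIX_SIZE):
--         url_hash_prefix = hashes[i:i+HASH_PREFIX_SIZE]
--         if url_hash_prefix in url_hash_prefix_set:
--             return False
--         url_hash_prefix_set.add(url_hash_prefix)
--     return True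
-- ===== SOURCE B (Python) =====
-- HASH_PREFIX_SIZE = 16
--
-- def _HasNoHashDuplicates(hashes):
--     """ Returns true if there are no duplicate hash prefixes """
--     prefixes = sorted(hashes[i:i+HASH_PREFIX_SIZE]
--                       for i in range(0, len(hashes), HASH_PREFIX_SIZE))
--     return all(a != b for a, b in zip(prefixes, prefixes[1:]))
-- ===== Notes on version B (the rewrite author's own statement) =====
-- stated objective: alternative
-- what changed: Replaced the incremental seen-set loop with early return by a set-free sort-based algorithm: sort the prefix list and check that no two adjacent sorted prefixes are equal (duplicates are adjacent after sorting).
import Mathlib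
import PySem

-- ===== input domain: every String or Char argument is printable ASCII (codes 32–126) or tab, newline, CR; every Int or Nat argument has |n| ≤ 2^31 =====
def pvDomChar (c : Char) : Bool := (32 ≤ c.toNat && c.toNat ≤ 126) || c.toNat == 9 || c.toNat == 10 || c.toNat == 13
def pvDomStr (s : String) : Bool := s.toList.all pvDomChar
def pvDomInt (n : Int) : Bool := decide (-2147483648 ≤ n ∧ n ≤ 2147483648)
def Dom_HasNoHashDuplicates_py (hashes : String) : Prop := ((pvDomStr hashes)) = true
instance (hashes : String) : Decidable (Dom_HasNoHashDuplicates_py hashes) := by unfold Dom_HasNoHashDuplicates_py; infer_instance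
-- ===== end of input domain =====

-- B replaces A's incremental seen-set loop (early return on a repeat) by a set-free
-- sort-based algorithm: sort the prefix list and check adjacent sorted prefixes differ.

-- ===== PORT A =====
-- A's loop over range(0, len(hashes), HASH_PREFIX_SIZE), slicing inside the loop and
-- keeping a seen-set; returns False as soon as a prefix repeats.
def pvLoopA (cs : List Char) : List Int → PySem.Set (List Char) → Bool
  | [], _ => true
  | i :: is, s =>
      let url_hash_prefix := PySem.List.slice cs (some i) (some (i + 16))
      if PySem.Set.contains s url_hash_prefix then false
      else pvLoopA cs is (PySem.Set.add s url_hash_prefix)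

def HasNoHashDuplicates_py (hashes : String) : Bool :=
  pvLoopA hashes.toList (PySem.List.pyRange 0 (PySem.Str.len hashes) 16) PySem.Set.empty

-- ===== PORT B =====
-- Source B: prefixes = sorted(chunks); all(a != b for a, b in zip(prefixes, prefixes[1:])).
-- Chunks are List Char; the sort key String.ofList gives exactly Python's
-- lexicographic code-point order on the chunk strings.
def HasNoHashDuplicates_py_alt (hashes : String) : Bool :=
  let cs := hashes.toList
  let prefixes := PySem.List.sorted
      ((PySem.List.pyRange 0 (PySem.Str.len hashes) 16).map
        (fun i => PySem.List.slice cs (some i) (some (i + 16))))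
      (fun c => String.ofList c) false
  (prefixes.zip (prefixes.drop 1)).all (fun p => p.1 != p.2)

-- ===== PRECONDITION & SPEC =====
def Spec_HasNoHashDuplicates_py (hashes : String) (out : Bool) : Prop := out = HasNoHashDuplicates_py_alt hashes
instance (hashes : String) (out : Bool) : Decidable (Spec_HasNoHashDuplicates_py hashes out) := by unfold Spec_HasNoHashDuplicates_py; infer_instance

-- ===== CLAIM (what is proved, stated in full; the proofs are below) =====
def Claim_equal_HasNoHashDuplicates_py : Prop := ∀ (hashes : String), Dom_HasNoHashDuplicates_py hashes → Spec_HasNoHashDuplicates_py hashes (HasNoHashDuplicates_py hashes)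

-- ===== LEMMAS AND PROOFS =====

-- A's loop abstracted over the (already-sliced) chunk list.
def pvGo : List (List Char) → PySem.Set (List Char) → Bool
  | [], _ => true
  | c :: l, s =>
      if PySem.Set.contains s c then false
      else pvGo l (PySem.Set.add s c)

theorem pvLoopA_eq_go (cs : List Char) :
    ∀ (is : List Int) (s : PySem.Set (List Char)),
      pvLoopA cs is s = pvGo (is.map (fun i => PySem.List.slice cs (some i) (some (i + 16)))) s := by
  intro is
  induction is with
  | nil => intro s; rfl
  | cons i is ih =>
      intro s
      simp only [pvLoopA, pvGo, List.map]
      split_ifs with h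
      · rfl
      · exact ih _

theorem pvGo_spec :
    ∀ (l : List (List Char)) (s : PySem.Set (List Char)),
      pvGo l s = decide (l.Nodup ∧ ∀ x ∈ l, x ∉ s) := by
  intro l
  induction l with
  | nil => intro s; simp [pvGo]
  | cons c l ih =>
      intro s
      simp only [pvGo]
      by_cases hc : c ∈ s
      · rw [if_pos ((PySem.Set.contains_iff s c).mpr hc)]
        refine (decide_eq_false ?_).symm
        rintro ⟨_, hall⟩
        exact hall c List.mem_cons_self hc
      · rw [if_neg (by simp [hc])]
        rw [ih]
        congr 1
        simp only [eq_iff_iff, List.nodup_cons, List.mem_cons]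
        constructor
        · rintro ⟨hnd, hall⟩
          refine ⟨⟨fun hcl => ?_, hnd⟩, ?_⟩
          · have := (PySem.Set.mem_add s c c).not.mp (hall c hcl)
            exact this (Or.inr rfl)
          · rintro x (rfl | hx)
            · exact hc
            · exact fun hxs => hall x hx ((PySem.Set.mem_add s c x).mpr (Or.inl hxs))
        · rintro ⟨⟨hcl, hnd⟩, hall⟩
          refine ⟨hnd, fun x hx hmem => ?_⟩
          rcases (PySem.Set.mem_add s c x).mp hmem with hxs | rfl
          · exact hall x (Or.inr hx) hxs
          · exact hcl hx

theorem pv_ofList_inj : Function.Injective String.ofList := by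
  intro a b h
  simpa using congrArg String.toList h

-- On a key-sorted list, "all adjacent pairs differ" is exactly Nodup.
theorem pvAdj_spec :
    ∀ (l : List (List Char)),
      l.Pairwise (fun a b => String.ofList a ≤ String.ofList b) →
      (((l.zip (l.drop 1)).all (fun p => p.1 != p.2)) = true ↔ l.Nodup) := by
  intro l
  induction l with
  | nil => intro _; simp
  | cons a t ih =>
      intro hp
      cases t with
      | nil => simp
      | cons b t =>
          rcases List.pairwise_cons.mp hp with ⟨hale, hpt⟩
          have iht := ih hpt
          simp only [List.drop_succ_cons, List.drop_zero, List.zip_cons_cons, List.all_cons,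
            Bool.and_eq_true, bne_iff_ne, ne_eq] at iht ⊢
          constructor
          · rintro ⟨hab, hrest⟩
            have hndt : (b :: t).Nodup := iht.mp hrest
            refine List.nodup_cons.mpr ⟨?_, hndt⟩
            have hkab : String.ofList a < String.ofList b :=
              lt_of_le_of_ne (hale b List.mem_cons_self) (fun h => hab (pv_ofList_inj h))
            intro hmem
            rcases List.mem_cons.mp hmem with rfl | hx
            · exact hab rfl
            · have hbx : String.ofList b ≤ String.ofList a :=
                (List.pairwise_cons.mp hpt).1 a hx
              exact absurd (lt_of_lt_of_le hkab hbx) (lt_irrefl _)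
          · intro hnd
            rcases List.nodup_cons.mp hnd with ⟨hamem, hndt⟩
            exact ⟨fun h => hamem (h ▸ List.mem_cons_self), iht.mpr hndt⟩

-- ===== VERDICT (by name: the statement is the Claim_ definition above) =====
theorem HasNoHashDuplicates_py_spec : Claim_equal_HasNoHashDuplicates_py := by
  intro hashes _
  unfold Spec_HasNoHashDuplicates_py HasNoHashDuplicates_py HasNoHashDuplicates_py_alt
  rw [pvLoopA_eq_go, pvGo_spec]
  set prefixes := (PySem.List.pyRange 0 (PySem.Str.len hashes) 16).map
      (fun i => PySem.List.slice hashes.toList (some i) (some (i + 16))) with hpref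
  set sp := PySem.List.sorted prefixes (fun c => String.ofList c) false with hsp
  have hperm : sp.Perm prefixes := PySem.List.sorted_perm prefixes _ false
  have hpair := PySem.List.sorted_pairwise (key := fun c => String.ofList c) prefixes
  have hadj := pvAdj_spec sp hpair
  have h1 : decide (prefixes.Nodup ∧ ∀ x ∈ prefixes, x ∉ PySem.Set.empty) =
      decide (prefixes.Nodup) := by
    simp [PySem.Set.empty]
  rw [h1]
  rcases Bool.eq_false_or_eq_true ((sp.zip (sp.drop 1)).all (fun p => p.1 != p.2)) with hb | hb
  · rw [hb]
    exact decide_eq_true ((hperm.nodup_iff).mp (hadj.mp hb))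
  · rw [hb]
    refine decide_eq_false ?_
    intro hnd
    exact Bool.false_ne_true (hb ▸ hadj.mpr ((hperm.nodup_iff).mpr hnd))
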